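-- pv_equiv track=rewrite | github.com/KaitoSaito2222/IST105-Assignment7 | bitwise_operations.py | perform_bitwise_operations
-- ===== SOURCE A (Python) =====
-- def perform_bitwise_operations(numbers):
--     and_result = numbers[0]
--     or_result = numbers[0]
--     xor_result = numbers[0]
--
--     for num in numbers[1:]:
--         and_result &= num
--         or_result |= num
--         xor_result ^= num
--
--     return and_result, or_result, xor_result
-- ===== SOURCE B (Python) =====
-- def _fold(op, xs):
--     acc = xs[0]
--     for x in xs[1:]:
--         acc = op(acc, x)
--     return acc
--
-- def perform_bitwise_operations(numbers):
--     return (_fold(int.__and__, numbers),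
--             _fold(int.__or__, numbers),
--             _fold(int.__xor__, numbers))
-- ===== Notes on version B (the rewrite author's own statement) =====
-- stated objective: alternative
-- what changed: Replaces the single fused loop over three mutable accumulators with three independent passes: a generic first-element-seeded fold applied separately with int.__and__, int.__or__ and int.__xor__.
import Mathlib
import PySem

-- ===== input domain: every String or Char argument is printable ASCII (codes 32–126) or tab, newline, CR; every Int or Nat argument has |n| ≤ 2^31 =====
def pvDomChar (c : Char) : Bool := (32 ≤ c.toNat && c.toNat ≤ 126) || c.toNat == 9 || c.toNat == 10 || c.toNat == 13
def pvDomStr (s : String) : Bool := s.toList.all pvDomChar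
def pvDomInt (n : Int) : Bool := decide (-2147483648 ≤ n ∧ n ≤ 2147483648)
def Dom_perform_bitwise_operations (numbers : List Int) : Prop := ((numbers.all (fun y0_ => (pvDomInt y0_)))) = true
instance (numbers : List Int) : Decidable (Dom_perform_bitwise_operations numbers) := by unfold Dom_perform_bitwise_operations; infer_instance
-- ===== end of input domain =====

-- B replaces A's single fused loop over three accumulators with three independent seeded folds; equivalence proved for nonempty input.

-- ===== PORT A =====
-- numbers[0] thrice, then one loop over numbers[1:] updating the three accumulators.
def perform_bitwise_operations (numbers : List Int) : Int × Int × Int :=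
  match numbers with
  | [] => (0, 0, 0)  -- Python raises IndexError here; excluded by Pre_
  | h :: t =>
      t.foldl (fun (s : Int × Int × Int) num => (Int.land s.1 num, Int.lor s.2.1 num, Int.xor s.2.2 num)) (h, h, h)

-- ===== PORT B =====
-- generic fold seeded with xs[0] over xs[1:]
def pvFoldOp (op : Int → Int → Int) (xs : List Int) : Int :=
  match xs with
  | [] => 0  -- Python raises IndexError here; excluded by Pre_
  | h :: t => t.foldl op h

def perform_bitwise_operations_alt (numbers : List Int) : Int × Int × Int :=
  (pvFoldOp Int.land numbers, pvFoldOp Int.lor numbers, pvFoldOp Int.xor numbers)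

-- ===== PRECONDITION & SPEC =====
-- Both A and B raise IndexError on the empty list (numbers[0]); Pre_ excludes exactly that input.
def Pre_perform_bitwise_operations (numbers : List Int) : Prop := numbers ≠ []
instance (numbers : List Int) : Decidable (Pre_perform_bitwise_operations numbers) := by
  unfold Pre_perform_bitwise_operations; infer_instance

def pvWitness_perform_bitwise_operations : List Int := [5, 3, 12]

def Spec_perform_bitwise_operations (numbers : List Int) (out : Int × Int × Int) : Prop :=
  out = perform_bitwise_operations_alt numbers
instance (numbers : List Int) (out : Int × Int × Int) : Decidable (Spec_perform_bitwise_operations numbers out) := by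
  unfold Spec_perform_bitwise_operations; infer_instance

-- ===== CLAIM (what is proved, stated in full; the proofs are below) =====
def Claim_equal_perform_bitwise_operations : Prop := ∀ (numbers : List Int), Dom_perform_bitwise_operations numbers → Pre_perform_bitwise_operations numbers → Spec_perform_bitwise_operations numbers (perform_bitwise_operations numbers)

-- ===== LEMMAS AND PROOFS =====
-- the fused triple fold computes the three independent folds componentwise
theorem fused_eq_three (t : List Int) (a b c : Int) :
    t.foldl (fun (s : Int × Int × Int) num => (Int.land s.1 num, Int.lor s.2.1 num, Int.xor s.2.2 num)) (a, b, c)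
      = (t.foldl Int.land a, t.foldl Int.lor b, t.foldl Int.xor c) := by
  induction t generalizing a b c with
  | nil => rfl
  | cons x xs ih => simp [List.foldl, ih]

-- ===== VERDICT (by name: the statement is the Claim_ definition above) =====
theorem perform_bitwise_operations_spec : Claim_equal_perform_bitwise_operations := by
  intro numbers _ hpre
  unfold Spec_perform_bitwise_operations perform_bitwise_operations perform_bitwise_operations_alt pvFoldOp
  cases numbers with
  | nil => exact absurd rfl hpre
  | cons h t => simp [fused_eq_three]
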